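-- pv_equiv track=rewrite | github.com/patchew-project/qemu | scripts/qapi/golang.py | generate_struct_type
-- ===== SOURCE A (Python) =====
-- from typing import List, Optional, Tuple
--
-- def generate_struct_type(
--     type_name, args: List[dict[str:str]] = None, ident: int = 0
-- ) -> str:
--     members = "{}"
--     base_ident = "\t" * ident
--     if args is not None:
--         # Most of the logic below is to mimic the gofmt tool.
--         # We calculate spaces between member and type and between
--         # the type and tag.  Note that gofmt considers comments as
--         # divider between ident blocks.
--         maxname, maxtype = 0, 0
--         blocks: tuple(int, int) = []
--         for arg in args:
--             if "comment" in arg: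
--                 blocks.append((maxname, maxtype))
--                 maxname, maxtype = 0, 0
--                 continue
--
--             if "type" not in arg:
--                 continue
--
--             maxname = max(maxname, len(arg["name"]))
--             maxtype = max(maxtype, len(arg["type"]))
--
--         blocks.append((maxname, maxtype))
--         block = 0
--
--         maxname, maxtype = blocks[0]
--         members = " {\n"
--         for arg in args:
--             if "comment" in arg:
--                 block += 1
--                 maxname, maxtype = blocks[block]
--                 members += f"""\t// {arg["comment"]}\n"""
--                 continue
--
--             name2type = ""
--             if "type" in arg:
--                 name2type = " " * (maxname - len(arg["name"]) + 1)
--             type2tag = ""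
--             if "tag" in arg:
--                 type2tag = " " * (maxtype - len(arg["type"]) + 1)
--
--             fident = "\t" * (ident + 1)
--             gotype = "" if "type" not in arg else arg["type"]
--             tag = "" if "tag" not in arg else arg["tag"]
--             name = arg["name"]
--             members += (
--                 f"""{fident}{name}{name2type}{gotype}{type2tag}{tag}\n"""
--             )
--         members += f"{base_ident}}}\n"
--
--     with_type = f"\n{base_ident}type {type_name}" if len(type_name) > 0 else ""
--     return f"""{with_type} struct{members}"""
-- ===== SOURCE B (Python) =====
-- def _split_segments(args):
--     """Split args at comment entries: returns (head_group, [(comment, group), ...])."""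
--     i, n = 0, len(args)
--     head = []
--     while i < n and "comment" not in args[i]:
--         head.append(args[i])
--         i += 1
--     rest = []
--     while i < n:
--         comment = args[i]["comment"]
--         i += 1
--         group = []
--         while i < n and "comment" not in args[i]:
--             group.append(args[i])
--             i += 1
--         rest.append((comment, group))
--     return head, rest
--
--
-- def _group_lines(group, fident):
--     typed = [a for a in group if "type" in a]
--     maxname = max((len(a["name"]) for a in typed), default=0)
--     maxtype = max((len(a["type"]) for a in typed), default=0)
--     out = ""
--     for a in group:
--         name = a["name"]
--         gotype = a.get("type", "")
--         tag = a.get("tag", "")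
--         n2t = " " * (maxname - len(name) + 1) if "type" in a else ""
--         t2t = " " * (maxtype - len(gotype) + 1) if "tag" in a else ""
--         out += f"{fident}{name}{n2t}{gotype}{t2t}{tag}\n"
--     return out
--
--
-- def generate_struct_type(type_name, args=None, ident=0):
--     base_ident = "\t" * ident
--     if args is None:
--         members = "{}"
--     else:
--         head, rest = _split_segments(args)
--         fident = "\t" * (ident + 1)
--         members = " {\n" + _group_lines(head, fident)
--         for comment, group in rest:
--             members += "\t// " + comment + "\n" + _group_lines(group, fident)
--         members += base_ident + "}\n"
--     with_type = f"\n{base_ident}type {type_name}" if len(type_name) > 0 else ""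
--     return f"{with_type} struct{members}"
-- ===== Notes on version B (the rewrite author's own statement) =====
-- stated objective: alternative
-- what changed: B splits the args into comment-separated segments by structural recursion and emits each segment with locally computed padding widths, replacing A's two global passes over a precomputed blocks width table with a running block counter.
-- crash fix: On args whose non-comment entries all carry a name key but where some non-comment entry has a tag key without a type key, A raises KeyError (it indexes the type entry whenever a tag is present) while B looks the type up with a default and returns the struct text with that tag padded one space past the segment maxtype. — e.g. on generate_struct_type("T", some [[("name", "a"), ("tag", "x")]], 0): A raises KeyError, B returns "\ntype T struct {\n\ta x\n}\n"
import Mathlib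
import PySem

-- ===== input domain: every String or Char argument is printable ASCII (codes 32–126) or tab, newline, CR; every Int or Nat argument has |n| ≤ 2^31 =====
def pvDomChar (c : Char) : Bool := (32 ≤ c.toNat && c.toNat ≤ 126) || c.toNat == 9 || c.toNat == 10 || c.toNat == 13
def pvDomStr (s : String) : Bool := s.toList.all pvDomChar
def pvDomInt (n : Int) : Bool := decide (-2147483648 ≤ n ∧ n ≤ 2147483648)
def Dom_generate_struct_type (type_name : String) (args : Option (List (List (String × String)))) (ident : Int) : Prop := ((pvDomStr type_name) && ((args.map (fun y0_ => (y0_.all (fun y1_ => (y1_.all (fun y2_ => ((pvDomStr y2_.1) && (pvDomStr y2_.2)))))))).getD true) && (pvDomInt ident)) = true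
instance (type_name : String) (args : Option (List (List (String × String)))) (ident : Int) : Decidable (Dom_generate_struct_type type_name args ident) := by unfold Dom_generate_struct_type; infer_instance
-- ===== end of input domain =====

-- B re-groups the args into comment-separated segments by structural recursion and emits each
-- segment with locally computed padding widths, instead of A's two global passes over a blocks
-- table with a running block counter (objective: alternative decomposition, same cost).

-- shared dict primitives: a Python dict[str,str] is an association list, lookup = first match
def pvGet (d : List (String × String)) (k : String) : Option String := List.lookup k d
def pvHas (d : List (String × String)) (k : String) : Bool := (pvGet d k).isSome
def pvGetS (d : List (String × String)) (k : String) : String := (pvGet d k).getD ""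
-- " " * n and "\t" * n (Python repetition clamps a negative count to the empty string, as .toNat does)
def pvSpaces (n : Nat) : String := String.mk (List.replicate n ' ')
def pvTabs (n : Int) : String := String.mk (List.replicate n.toNat '\t')

-- ===== PORT A =====
-- first pass: accumulate (maxname, maxtype, blocks)
def pvAStep1 (st : Nat × Nat × List (Nat × Nat)) (arg : List (String × String)) : Nat × Nat × List (Nat × Nat) :=
  if pvHas arg "comment" then (0, 0, st.2.2 ++ [(st.1, st.2.1)])
  else if pvHas arg "type" = false then st
  else (max st.1 (pvGetS arg "name").length, max st.2.1 (pvGetS arg "type").length, st.2.2)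

-- one member line of A's second pass (current block widths mn, mt); inside Pre_ the Nat
-- subtractions never underflow (the arg contributed to mn/mt), matching Python exactly
def pvALine (ident : Int) (mn mt : Nat) (arg : List (String × String)) : String :=
  let name2type := if pvHas arg "type" then pvSpaces (mn - (pvGetS arg "name").length + 1) else ""
  let type2tag := if pvHas arg "tag" then pvSpaces (mt - (pvGetS arg "type").length + 1) else ""
  let fident := pvTabs (ident + 1)
  let gotype := if pvHas arg "type" then pvGetS arg "type" else ""
  let tag := if pvHas arg "tag" then pvGetS arg "tag" else ""
  let name := pvGetS arg "name"
  fident ++ name ++ name2type ++ gotype ++ type2tag ++ tag ++ "\n"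

-- second pass: state (block, maxname, maxtype, members)
def pvAStep2 (ident : Int) (blocks : List (Nat × Nat)) (st : Nat × Nat × Nat × String) (arg : List (String × String)) : Nat × Nat × Nat × String :=
  if pvHas arg "comment" then
    let blk := st.1 + 1
    let w := blocks.getD blk (0, 0)
    (blk, w.1, w.2, st.2.2.2 ++ "\t// " ++ pvGetS arg "comment" ++ "\n")
  else
    (st.1, st.2.1, st.2.2.1, st.2.2.2 ++ pvALine ident st.2.1 st.2.2.1 arg)

def generate_struct_type (type_name : String) (args : Option (List (List (String × String)))) (ident : Int) : String :=
  let base_ident := pvTabs ident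
  let members :=
    match args with
    | none => "{}"
    | some l =>
      let st1 := l.foldl pvAStep1 (0, 0, [])
      let blocks := st1.2.2 ++ [(st1.1, st1.2.1)]
      let w0 := blocks.getD 0 (0, 0)
      let st2 := l.foldl (pvAStep2 ident blocks) (0, w0.1, w0.2, " {\n")
      st2.2.2.2 ++ base_ident ++ "}\n"
  let with_type := if type_name.length > 0 then "\n" ++ base_ident ++ "type " ++ type_name else ""
  with_type ++ " struct" ++ members

-- ===== PORT B =====
-- split args at comment entries: (head group, [(comment, group), ...]); the Source B while-loops
-- collecting a run of non-comment args are List.takeWhile/dropWhile, the outer while is pvSplitRest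
def pvSplitRest : List (List (String × String)) → List (String × List (List (String × String)))
  | [] => []
  | a :: rest =>
    (pvGetS a "comment", rest.takeWhile (fun x => !pvHas x "comment"))
      :: pvSplitRest (rest.dropWhile (fun x => !pvHas x "comment"))
termination_by l => l.length
decreasing_by
  have := List.length_dropWhile_le (fun x => !pvHas x "comment") rest
  simp only [List.length_cons]
  omega

def pvSplit (l : List (List (String × String))) : List (List (String × String)) × List (String × List (List (String × String))) :=
  (l.takeWhile (fun x => !pvHas x "comment"), pvSplitRest (l.dropWhile (fun x => !pvHas x "comment")))

-- maxname/maxtype of one segment (max(..., default=0))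
def pvGroupWidths (g : List (List (String × String))) : Nat × Nat :=
  let typed := g.filter (fun a => pvHas a "type")
  (((typed.map (fun a => (pvGetS a "name").length)).max?).getD 0,
   ((typed.map (fun a => (pvGetS a "type").length)).max?).getD 0)

-- one member line of B (gotype/tag via .get(key, ""))
def pvBLine (fident : String) (mn mt : Nat) (a : List (String × String)) : String :=
  let name := pvGetS a "name"
  let gotype := pvGetS a "type"
  let tag := pvGetS a "tag"
  let n2t := if pvHas a "type" then pvSpaces (mn - name.length + 1) else ""
  let t2t := if pvHas a "tag" then pvSpaces (mt - gotype.length + 1) else ""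
  fident ++ name ++ n2t ++ gotype ++ t2t ++ tag ++ "\n"

def pvGroupLines (fident : String) (mn mt : Nat) (g : List (List (String × String))) : String :=
  g.foldl (fun s a => s ++ pvBLine fident mn mt a) ""

def generate_struct_type_alt (type_name : String) (args : Option (List (List (String × String)))) (ident : Int) : String :=
  let base_ident := pvTabs ident
  let members :=
    match args with
    | none => "{}"
    | some l =>
      let hr := pvSplit l
      let fident := pvTabs (ident + 1)
      let w := pvGroupWidths hr.1
      let start := " {\n" ++ pvGroupLines fident w.1 w.2 hr.1
      let body := hr.2.foldl (fun s cg =>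
        let wg := pvGroupWidths cg.2
        s ++ ("\t// " ++ cg.1 ++ "\n" ++ pvGroupLines fident wg.1 wg.2 cg.2)) start
      body ++ base_ident ++ "}\n"
  let with_type := if type_name.length > 0 then "\n" ++ base_ident ++ "type " ++ type_name else ""
  with_type ++ " struct" ++ members

-- ===== PRECONDITION & SPEC =====
-- Pre_ excludes exactly the inputs where the Python A raises a KeyError: a non-comment arg
-- without a name key, or a non-comment arg with a tag key but no type key.
def Pre_generate_struct_type (type_name : String) (args : Option (List (List (String × String)))) (ident : Int) : Prop :=
  ∀ a ∈ args.getD [], (pvHas a "comment" = false →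
    pvHas a "name" = true ∧ (pvHas a "tag" = true → pvHas a "type" = true))
instance (type_name : String) (args : Option (List (List (String × String)))) (ident : Int) : Decidable (Pre_generate_struct_type type_name args ident) := by unfold Pre_generate_struct_type; infer_instance
def pvWitness_generate_struct_type : String × (Option (List (List (String × String)))) × Int :=
  ("Foo", some [[("name", "a"), ("type", "int")], [("comment", "hi")], [("name", "b")]], 1)

-- A raises KeyError on args whose non-comment entries all carry a name key but some non-comment
-- entry has a tag key without a type key; B returns the struct text with that tag padded one space past maxtype.
def Raises_generate_struct_type (type_name : String) (args : Option (List (List (String × String)))) (ident : Int) : Prop :=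
  (∀ a ∈ args.getD [], (pvHas a "comment" = false → pvHas a "name" = true)) ∧
  (∃ a ∈ args.getD [], pvHas a "comment" = false ∧ pvHas a "tag" = true ∧ pvHas a "type" = false)
instance (type_name : String) (args : Option (List (List (String × String)))) (ident : Int) : Decidable (Raises_generate_struct_type type_name args ident) := by unfold Raises_generate_struct_type; infer_instance
def pvRaiseWitness_generate_struct_type : String × (Option (List (List (String × String)))) × Int :=
  ("T", some [[("name", "a"), ("tag", "x")]], 0)
def pvRaiseWitnessOut_generate_struct_type : String := "\ntype T struct {\n\ta x\n}\n"

def Spec_generate_struct_type (type_name : String) (args : Option (List (List (String × String)))) (ident : Int) (out : String) : Prop := out = generate_struct_type_alt type_name args ident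
instance (type_name : String) (args : Option (List (List (String × String)))) (ident : Int) (out : String) : Decidable (Spec_generate_struct_type type_name args ident out) := by unfold Spec_generate_struct_type; infer_instance

-- ===== CLAIM (what is proved, stated in full; the proofs are below) =====
def Claim_equal_generate_struct_type : Prop := ∀ (type_name : String) (args : Option (List (List (String × String)))) (ident : Int), Dom_generate_struct_type type_name args ident → Pre_generate_struct_type type_name args ident → Spec_generate_struct_type type_name args ident (generate_struct_type type_name args ident)
def Claim_raises_generate_struct_type : Prop := (∀ (type_name : String) (args : Option (List (List (String × String)))) (ident : Int), Dom_generate_struct_type type_name args ident → Raises_generate_struct_type type_name args ident → ¬ Pre_generate_struct_type type_name args ident) ∧ (Dom_generate_struct_type (pvRaiseWitness_generate_struct_type.1) (pvRaiseWitness_generate_struct_type.2.1) (pvRaiseWitness_generate_struct_type.2.2) ∧ Raises_generate_struct_type (pvRaiseWitness_generate_struct_type.1) (pvRaiseWitness_generate_struct_type.2.1) (pvRaiseWitness_generate_struct_type.2.2) ∧ generate_struct_type_alt (pvRaiseWitness_generate_struct_type.1) (pvRaiseWitness_generate_struct_type.2.1) (pvRaiseWitness_generate_struct_type.2.2) = 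pvRaiseWitnessOut_generate_struct_type)

-- ===== LEMMAS AND PROOFS =====

lemma pvSplit_nil : pvSplit [] = ([], []) := by simp [pvSplit, pvSplitRest]

lemma pvSplit_comment (a : List (String × String)) (rest : List (List (String × String)))
    (h : pvHas a "comment" = true) :
    pvSplit (a :: rest) = ([], (pvGetS a "comment", (pvSplit rest).1) :: (pvSplit rest).2) := by
  simp [pvSplit, pvSplitRest, List.takeWhile_cons, List.dropWhile_cons, h]

lemma pvSplit_other (a : List (String × String)) (rest : List (List (String × String)))
    (h : pvHas a "comment" = false) :
    pvSplit (a :: rest) = (a :: (pvSplit rest).1, (pvSplit rest).2) := by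
  simp [pvSplit, List.takeWhile_cons, List.dropWhile_cons, h]

-- running name-width / type-width of a segment, as A's first pass computes them
def pvNameW (g : List (List (String × String))) (m : Nat) : Nat :=
  g.foldl (fun m a => if pvHas a "type" then max m (pvGetS a "name").length else m) m
def pvTypeW (g : List (List (String × String))) (m : Nat) : Nat :=
  g.foldl (fun m a => if pvHas a "type" then max m (pvGetS a "type").length else m) m

-- body of the output after the head segment, shared canonical form
def pvBody (fident : String) (r : List (String × List (List (String × String)))) : String :=
  r.foldl (fun s cg =>
    s ++ ("\t// " ++ cg.1 ++ "\n" ++ pvGroupLines fident (pvGroupWidths cg.2).1 (pvGroupWidths cg.2).2 cg.2)) ""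

lemma pvFoldMax (L : List Nat) (m : Nat) : L.foldl max m = max m ((L.max?).getD 0) := by
  induction L generalizing m with
  | nil => simp
  | cons x t ih =>
    simp only [List.foldl_cons, List.max?_cons]
    rw [ih (max m x)]
    cases t.max? <;> simp <;> omega

lemma pvNameW_zero (g : List (List (String × String))) (m : Nat) :
    pvNameW g m = max m (pvGroupWidths g).1 := by
  have h : ∀ m, pvNameW g m = ((g.filter (fun a => pvHas a "type")).map (fun a => (pvGetS a "name").length)).foldl max m := by
    induction g with
    | nil => intro m; simp [pvNameW]
    | cons a t ih =>
      intro m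
      by_cases h : pvHas a "type" = true <;>
        simp [pvNameW, List.filter_cons, h, List.foldl_cons] <;> exact ih _
  rw [h, pvFoldMax, pvGroupWidths]

lemma pvTypeW_zero (g : List (List (String × String))) (m : Nat) :
    pvTypeW g m = max m (pvGroupWidths g).2 := by
  have h : ∀ m, pvTypeW g m = ((g.filter (fun a => pvHas a "type")).map (fun a => (pvGetS a "type").length)).foldl max m := by
    induction g with
    | nil => intro m; simp [pvTypeW]
    | cons a t ih =>
      intro m
      by_cases h : pvHas a "type" = true <;>
        simp [pvTypeW, List.filter_cons, h, List.foldl_cons] <;> exact ih _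
  rw [h, pvFoldMax, pvGroupWidths]

-- A's first pass computes exactly the per-segment widths of B's split
lemma pvPass1 (l : List (List (String × String))) (m t : Nat) (bs : List (Nat × Nat)) :
    (let st := l.foldl pvAStep1 (m, t, bs); st.2.2 ++ [(st.1, st.2.1)])
      = bs ++ (pvNameW (pvSplit l).1 m, pvTypeW (pvSplit l).1 t)
          :: (pvSplit l).2.map (fun cg => (pvNameW cg.2 0, pvTypeW cg.2 0)) := by
  induction l generalizing m t bs with
  | nil => simp [pvSplit_nil, pvNameW, pvTypeW]
  | cons a rest ih =>
    by_cases hc : pvHas a "comment" = true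
    · rw [pvSplit_comment a rest hc]
      simp only [List.foldl_cons, pvAStep1, hc, if_pos]
      rw [ih 0 0 (bs ++ [(m, t)])]
      simp [pvNameW, pvTypeW, hc]
    · by_cases ht : pvHas a "type" = true
      · rw [pvSplit_other a rest (by simpa using hc)]
        simp only [List.foldl_cons, pvAStep1, hc, ht, if_neg, Bool.not_eq_true]
        rw [ih]
        simp [pvNameW, pvTypeW, hc, ht, List.foldl_cons]
      · rw [pvSplit_other a rest (by simpa using hc)]
        simp only [List.foldl_cons, pvAStep1, hc, ht, Bool.not_eq_true]
        rw [ih]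
        simp [pvNameW, pvTypeW, hc, ht, List.foldl_cons]

lemma pvFoldApp {α : Type} (f : α → String) (l : List α) (acc : String) :
    l.foldl (fun s a => s ++ f a) acc = acc ++ l.foldl (fun s a => s ++ f a) "" := by
  induction l generalizing acc with
  | nil => simp
  | cons a t ih => rw [List.foldl_cons, List.foldl_cons, ih (acc ++ f a), ih ("" ++ f a)]
                   simp [String.append_assoc]

lemma pvALine_eq (ident : Int) (mn mt : Nat) (a : List (String × String)) :
    pvALine ident mn mt a = pvBLine (pvTabs (ident + 1)) mn mt a := by
  simp only [pvALine, pvBLine, pvGetS, pvHas]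
  cases h1 : pvGet a "type" <;> cases h2 : pvGet a "tag" <;> simp [h1, h2]

lemma pvGroupLines_cons (fident : String) (mn mt : Nat) (a : List (String × String)) (g : List (List (String × String))) :
    pvGroupLines fident mn mt (a :: g) = pvBLine fident mn mt a ++ pvGroupLines fident mn mt g := by
  simp only [pvGroupLines, List.foldl_cons]
  rw [pvFoldApp (pvBLine fident mn mt)]
  simp

lemma pvBody_cons (fident : String) (c : String) (g : List (List (String × String))) (r : List (String × List (List (String × String)))) :
    pvBody fident ((c, g) :: r)
      = ("\t// " ++ c ++ "\n" ++ pvGroupLines fident (pvGroupWidths g).1 (pvGroupWidths g).2 g) ++ pvBody fident r := by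
  simp only [pvBody, List.foldl_cons]
  rw [pvFoldApp (fun cg : String × List (List (String × String)) => ("\t// " ++ cg.1 ++ "\n" ++ pvGroupLines fident (pvGroupWidths cg.2).1 (pvGroupWidths cg.2).2 cg.2))]
  simp

-- A's second pass, given the widths of the remaining segments at positions k+1, k+2, … of blocks
lemma pvPass2 (ident : Int) (B : List (Nat × Nat)) :
    ∀ (l : List (List (String × String))) (k mn mt : Nat) (acc : String),
      B.drop (k + 1) = (pvSplit l).2.map (fun cg => pvGroupWidths cg.2) →
      (l.foldl (pvAStep2 ident B) (k, mn, mt, acc)).2.2.2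
        = acc ++ pvGroupLines (pvTabs (ident + 1)) mn mt (pvSplit l).1
              ++ pvBody (pvTabs (ident + 1)) (pvSplit l).2 := by
  intro l
  induction l with
  | nil => intro k mn mt acc _; simp [pvSplit_nil, pvGroupLines, pvBody]
  | cons a rest ih =>
    intro k mn mt acc hB
    by_cases hc : pvHas a "comment" = true
    · have hsplit : pvSplit (a :: rest)
          = ([], (pvGetS a "comment", (pvSplit rest).1) :: (pvSplit rest).2) :=
        pvSplit_comment a rest hc
      rw [hsplit] at hB ⊢
      simp only [List.map_cons] at hB
      have hget : B.getD (k + 1) (0, 0) = pvGroupWidths (pvSplit rest).1 := by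
        rw [List.getD_eq_getElem?_getD, ← List.head?_drop, hB]; rfl
      have htail : B.drop (k + 2) = (pvSplit rest).2.map (fun cg => pvGroupWidths cg.2) := by
        have := congrArg List.tail hB
        rwa [List.tail_drop] at this
      simp only [List.foldl_cons, pvAStep2, hc, if_pos, hget]
      rw [ih (k + 1) _ _ _ htail]
      rw [pvBody_cons]
      simp [pvGroupLines, String.append_assoc]
    · have hsplit : pvSplit (a :: rest) = (a :: (pvSplit rest).1, (pvSplit rest).2) :=
        pvSplit_other a rest (by simpa using hc)
      rw [hsplit] at hB ⊢
      simp only [List.foldl_cons, pvAStep2, hc, Bool.not_eq_true, if_neg]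
      rw [ih k mn mt _ hB]
      rw [pvGroupLines_cons, pvALine_eq]
      simp [String.append_assoc]

lemma pvMembersB_fold (ident : Int) (l : List (List (String × String))) (acc : String) :
    (pvSplit l).2.foldl (fun s cg =>
        let wg := pvGroupWidths cg.2
        s ++ ("\t// " ++ cg.1 ++ "\n" ++ pvGroupLines (pvTabs (ident + 1)) wg.1 wg.2 cg.2)) acc
      = acc ++ pvBody (pvTabs (ident + 1)) (pvSplit l).2 := by
  exact pvFoldApp (fun cg : String × List (List (String × String)) =>
    ("\t// " ++ cg.1 ++ "\n" ++ pvGroupLines (pvTabs (ident + 1)) (pvGroupWidths cg.2).1 (pvGroupWidths cg.2).2 cg.2)) _ acc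

lemma pvEq (type_name : String) (args : Option (List (List (String × String)))) (ident : Int) :
    generate_struct_type type_name args ident = generate_struct_type_alt type_name args ident := by
  cases args with
  | none => rfl
  | some l =>
    simp only [generate_struct_type, generate_struct_type_alt]
    congr 1
    have hwmap : (pvSplit l).2.map (fun cg => (pvNameW cg.2 0, pvTypeW cg.2 0))
        = (pvSplit l).2.map (fun cg => pvGroupWidths cg.2) := by
      apply List.map_congr_left
      intro cg _
      rw [pvNameW_zero, pvTypeW_zero]
      simp
    have hhead : (pvNameW (pvSplit l).1 0, pvTypeW (pvSplit l).1 0) = pvGroupWidths (pvSplit l).1 := by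
      rw [pvNameW_zero, pvTypeW_zero]
      simp
    have hblocks : (l.foldl pvAStep1 (0, 0, [])).2.2
          ++ [((l.foldl pvAStep1 (0, 0, [])).1, (l.foldl pvAStep1 (0, 0, [])).2.1)]
        = pvGroupWidths (pvSplit l).1 :: (pvSplit l).2.map (fun cg => pvGroupWidths cg.2) := by
      have h1 := pvPass1 l 0 0 []
      simp only [List.nil_append] at h1
      rw [h1, hwmap, hhead]
    rw [hblocks]
    have hdrop : (pvGroupWidths (pvSplit l).1 :: (pvSplit l).2.map (fun cg => pvGroupWidths cg.2)).drop (0 + 1)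
        = (pvSplit l).2.map (fun cg => pvGroupWidths cg.2) := by simp
    rw [pvPass2 ident _ l 0 _ _ _ hdrop, pvMembersB_fold ident l]
    simp [String.append_assoc]

-- ===== VERDICT (by name: the statement is the Claim_ definition above) =====
theorem generate_struct_type_spec : Claim_equal_generate_struct_type := by
  intro type_name args ident _ _
  unfold Spec_generate_struct_type
  exact pvEq type_name args ident

theorem generate_struct_type_raises : Claim_raises_generate_struct_type := by
  unfold Claim_raises_generate_struct_type
  refine ⟨?_, by decide, by decide, by rw [← pvEq]; decide⟩
  rintro type_name args ident _ ⟨_, a, ha, hc, htag, htype⟩ hpre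
  have := (hpre a ha hc).2 htag
  rw [this] at htype
  simp at htype

-- self-check: the raises witness itself is excluded by Pre_ (via the first half of the raises claim)
theorem pvRaiseWitnessNotPre_ok : ¬ Pre_generate_struct_type (pvRaiseWitness_generate_struct_type.1) (pvRaiseWitness_generate_struct_type.2.1) (pvRaiseWitness_generate_struct_type.2.2) :=
  generate_struct_type_raises.1 _ _ _ (by decide) (by decide)
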